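-- pv_equiv track=rewrite | github.com/mosadd1X/novelforge-ai | src/utils/genre_utils.py | is_fiction_genre
-- ===== SOURCE A (Python) =====
-- def is_fiction_genre(genre: str) -> bool:
--     """
--     Determine if a genre is fiction or non-fiction.
--
--     Args:
--         genre: The genre of the book
--
--     Returns:
--         bool: True if fiction, False if non-fiction
--     """
--     fiction_genres = [
--         "literary fiction", "commercial fiction", "mystery", "mystery thriller",
--         "thriller", "romance", "fantasy", "epic fantasy", "science fiction",
--         "historical fiction", "horror", "young adult", "middle grade",
--         "children's chapter books", "speculative fiction", "alternate history",
--         "contemporary fiction", "paranormal romance", "urban fantasy", "dystopian",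
--         "short story collection", "novella", "graphic novel", "test"
--     ]
--
--     genre_lower = genre.lower()
--     return any(fiction_genre in genre_lower for fiction_genre in fiction_genres)
-- ===== SOURCE B (Python) =====
-- _FICTION_GENRES = [
--     "literary fiction", "commercial fiction", "mystery", "mystery thriller",
--     "thriller", "romance", "fantasy", "epic fantasy", "science fiction",
--     "historical fiction", "horror", "young adult", "middle grade",
--     "children's chapter books", "speculative fiction", "alternate history",
--     "contemporary fiction", "paranormal romance", "urban fantasy", "dystopian",
--     "short story collection", "novella", "graphic novel", "test"
-- ]
--
--
-- def is_fiction_genre(genre: str) -> bool: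
--     g = genre.lower()
--     for i, c in enumerate(g):
--         for p in _FICTION_GENRES:
--             if p[0] == c and g.startswith(p, i):
--                 return True
--     return False
-- ===== Notes on version B (the rewrite author's own statement) =====
-- stated objective: alternative
-- what changed: Replaced the 24 independent per-pattern substring searches with a single left-to-right scan over the lowered string that at each position tries only the genre names whose first character matches the current character, via startswith at that position.
import Mathlib
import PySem

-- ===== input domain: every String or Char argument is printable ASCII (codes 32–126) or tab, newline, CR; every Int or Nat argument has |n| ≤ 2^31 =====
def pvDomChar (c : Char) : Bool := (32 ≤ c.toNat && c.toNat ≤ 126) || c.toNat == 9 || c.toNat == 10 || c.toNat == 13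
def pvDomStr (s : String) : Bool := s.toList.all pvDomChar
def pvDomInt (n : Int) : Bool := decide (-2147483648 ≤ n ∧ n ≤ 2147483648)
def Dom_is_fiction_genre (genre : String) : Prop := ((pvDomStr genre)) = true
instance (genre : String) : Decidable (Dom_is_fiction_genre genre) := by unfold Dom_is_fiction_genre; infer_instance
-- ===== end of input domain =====

-- B replaces A's 24 independent substring searches by one left-to-right scan of the string,
-- trying at each position only the genres whose first character matches (objective: alternative).

-- ===== PORT A =====
-- the fiction_genres list local to A
def fictionGenresA : List String := [
  "literary fiction", "commercial fiction", "mystery", "mystery thriller",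
  "thriller", "romance", "fantasy", "epic fantasy", "science fiction",
  "historical fiction", "horror", "young adult", "middle grade",
  "children's chapter books", "speculative fiction", "alternate history",
  "contemporary fiction", "paranormal romance", "urban fantasy", "dystopian",
  "short story collection", "novella", "graphic novel", "test"]

def is_fiction_genre (genre : String) : Bool :=
  let genre_lower := PySem.Str.lower genre
  fictionGenresA.any (fun fg => PySem.Str.isIn fg genre_lower)

-- ===== PORT B =====
-- B's module-level _FICTION_GENRES, as character lists
def fictionGenresB : List (List Char) := [
  "literary fiction".toList, "commercial fiction".toList, "mystery".toList, "mystery thriller".toList,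
  "thriller".toList, "romance".toList, "fantasy".toList, "epic fantasy".toList, "science fiction".toList,
  "historical fiction".toList, "horror".toList, "young adult".toList, "middle grade".toList,
  "children's chapter books".toList, "speculative fiction".toList, "alternate history".toList,
  "contemporary fiction".toList, "paranormal romance".toList, "urban fantasy".toList, "dystopian".toList,
  "short story collection".toList, "novella".toList, "graphic novel".toList, "test".toList]

-- the 'for i, c in enumerate(g): for p in …: if p[0] == c and g.startswith(p, i)' scan,
-- as structural recursion over the remaining suffix of g (g.startswith(p, i) = p prefix of the suffix)
def scanB (pats : List (List Char)) : List Char → Bool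
  | [] => false
  | c :: rest =>
      if pats.any (fun p => p.head? == some c && PySem.Chars.startswith (c :: rest) p) then true
      else scanB pats rest

def is_fiction_genre_alt (genre : String) : Bool :=
  scanB fictionGenresB (PySem.Chars.lower genre.toList)

-- ===== PRECONDITION & SPEC =====
def Spec_is_fiction_genre (genre : String) (out : Bool) : Prop := out = is_fiction_genre_alt genre
instance (genre : String) (out : Bool) : Decidable (Spec_is_fiction_genre genre out) := by unfold Spec_is_fiction_genre; infer_instance

-- ===== CLAIM (what is proved, stated in full; the proofs are below) =====
def Claim_equal_is_fiction_genre : Prop := ∀ (genre : String), Dom_is_fiction_genre genre → Spec_is_fiction_genre genre (is_fiction_genre genre)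

-- ===== LEMMAS AND PROOFS =====

-- B's position scan finds a pattern iff that pattern occurs as a substring (patterns nonempty)
theorem scanB_eq_any_isIn (pats : List (List Char)) (hne : ∀ p ∈ pats, p ≠ []) :
    ∀ s : List Char, scanB pats s = pats.any (fun p => PySem.Chars.isIn p s) := by
  intro s
  induction s with
  | nil =>
      rw [scanB]
      symm
      rw [List.any_eq_false]
      intro p hp hin
      exact hne p hp (List.infix_nil.mp ((PySem.Chars.isIn_iff_infix p []).mp hin))
  | cons c rest ih =>
      by_cases h : pats.any (fun p => p.head? == some c && PySem.Chars.startswith (c :: rest) p) = true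
      · rw [scanB, if_pos h]
        rcases List.any_eq_true.mp h with ⟨p, hp, hpc⟩
        have hsw : PySem.Chars.startswith (c :: rest) p = true := by
          simp only [Bool.and_eq_true] at hpc; exact hpc.2
        have hpre : p <+: (c :: rest) := (PySem.Chars.startswith_iff _ _).mp hsw
        exact (List.any_eq_true.mpr ⟨p, hp, (PySem.Chars.isIn_iff_infix p (c :: rest)).mpr hpre.isInfix⟩).symm
      · rw [scanB, if_neg h, ih]
        apply Bool.eq_iff_iff.mpr
        simp only [List.any_eq_true]
        constructor
        · rintro ⟨p, hp, hin⟩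
          refine ⟨p, hp, (PySem.Chars.isIn_iff_infix p (c :: rest)).mpr ?_⟩
          exact ((PySem.Chars.isIn_iff_infix p rest).mp hin).trans (List.suffix_cons c rest).isInfix
        · rintro ⟨p, hp, hin⟩
          rcases (PySem.Chars.exists_prefix_drop_iff_isIn p (c :: rest)).mpr hin with ⟨j, hj⟩
          cases j with
          | zero =>
              exfalso
              have hpre : p <+: (c :: rest) := by simpa using hj
              have hsw : PySem.Chars.startswith (c :: rest) p = true :=
                (PySem.Chars.startswith_iff _ _).mpr hpre
              have hhead : p.head? = some c := by
                obtain ⟨a, q, rfl⟩ := List.exists_cons_of_ne_nil (hne p hp)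
                rcases hpre with ⟨t, ht⟩
                simp only [List.cons_append, List.cons.injEq] at ht
                simp [ht.1]
              exact h (List.any_eq_true.mpr ⟨p, hp, by simp [hhead, hsw]⟩)
          | succ k =>
              refine ⟨p, hp, (PySem.Chars.isIn_iff_infix p rest).mpr ?_⟩
              have hk : p <+: rest.drop k := by simpa using hj
              exact hk.isInfix.trans (List.drop_suffix k rest).isInfix

theorem is_fiction_genre_spec : Claim_equal_is_fiction_genre := by
  intro genre _
  unfold Spec_is_fiction_genre is_fiction_genre is_fiction_genre_alt
  rw [scanB_eq_any_isIn fictionGenresB (by decide)]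
  simp [fictionGenresA, fictionGenresB, PySem.Str.isIn]
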